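-- pv_equiv track=rewrite | github.com/mikewarot/Bitgrid_python | bitgrid/cli/stream_text_w2e.py | build_parity_aligned_schedule
-- ===== SOURCE A (Python) =====
-- from typing import List, Tuple, Optional
--
-- def build_parity_aligned_schedule(orig_frames: List[List[int]], per_lane_delays: List[int]) -> Tuple[List[List[int]], List[int]]:
--     """Schedule injections so that for each frame k, all lanes arrive at the same East step.
--     Uses measured per-lane delays (in steps). For checkerboard two-phase grids with width=2,
--     delays typically alternate like [1,2,1,2,...]. We choose arrival A_k = 2*k + c with
--     c = max_delay to ensure non-negative times and consistent parity, and drive lane r at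
--     step t = A_k - delay[r]. Returns (schedule, arrival_indices_per_frame).
--     """
--     if not orig_frames:
--         return [], []
--     lanes = len(orig_frames[0])
--     nonneg = [d for d in per_lane_delays if d is not None and d >= 0]
--     max_delay = max(nonneg) if nonneg else 0
--     n = len(orig_frames)
--     steps = 2*n + max_delay
--     schedule: List[List[int]] = [[0]*lanes for _ in range(steps)]
--     arrivals: List[int] = []
--     for k in range(n):
--         A_k = 2*k + max_delay
--         arrivals.append(A_k)
--         for r in range(lanes):
--             d = per_lane_delays[r] if r < len(per_lane_delays) and per_lane_delays[r] is not None else max_delay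
--             t = A_k - int(d)
--             if 0 <= t < steps:
--                 schedule[t][r] = orig_frames[k][r]
--     # Add a final flush step
--     schedule.append([0]*lanes)
--     return schedule, arrivals
-- ===== SOURCE B (Python) =====
-- from typing import List, Tuple
--
-- def build_parity_aligned_schedule(orig_frames: List[List[int]], per_lane_delays: List[int]) -> Tuple[List[List[int]], List[int]]:
--     """Gather formulation: each output cell (t, r) recovers the unique frame
--     k = (t - max_delay + d_r) // 2 (if that quantity is even and in range) that
--     lane r injects at step t, instead of zero-filling a grid and scattering.
--     Steps outside [lo, hi], the band where any frame can land, are zero rows."""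
--     if not orig_frames:
--         return [], []
--     lanes = len(orig_frames[0])
--     nonneg = [d for d in per_lane_delays if d is not None and d >= 0]
--     max_delay = max(nonneg) if nonneg else 0
--     n = len(orig_frames)
--     steps = 2 * n + max_delay
--     # per-lane delay with A's fallback rule, resolved once per lane
--     ds = [int(per_lane_delays[r]) if r < len(per_lane_delays) and per_lane_delays[r] is not None else max_delay
--           for r in range(lanes)]
--     if ds:
--         lo = max_delay - max(ds)
--         hi = 2 * (n - 1) + max_delay - min(ds)
--     else:
--         lo = 0
--         hi = -1
--     shifts = [(r, d - max_delay) for r, d in enumerate(ds)]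
--     schedule = [
--         [orig_frames[k][r]
--          if (num := t + s) % 2 == 0 and 0 <= (k := num // 2) < n else 0
--          for r, s in shifts]
--         if lo <= t <= hi else [0] * lanes
--         for t in range(steps)]
--     schedule.append([0] * lanes)
--     arrivals = [2 * k + max_delay for k in range(n)]
--     return schedule, arrivals
-- ===== Notes on version B (the rewrite author's own statement) =====
-- stated objective: alternative
-- what changed: Inverts the loop nesting: instead of zero-filling a steps-by-lanes grid and scattering each frame k into cell (2k+max_delay-d_r, r) by in-place writes, B computes each output cell (t,r) directly by recovering the unique frame k = (t-max_delay+d_r)//2 when that quantity is even and in range, emitting steps outside the feasible arrival band [lo,hi] as zero rows (gather instead of scatter, no mutation).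
import Mathlib
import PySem

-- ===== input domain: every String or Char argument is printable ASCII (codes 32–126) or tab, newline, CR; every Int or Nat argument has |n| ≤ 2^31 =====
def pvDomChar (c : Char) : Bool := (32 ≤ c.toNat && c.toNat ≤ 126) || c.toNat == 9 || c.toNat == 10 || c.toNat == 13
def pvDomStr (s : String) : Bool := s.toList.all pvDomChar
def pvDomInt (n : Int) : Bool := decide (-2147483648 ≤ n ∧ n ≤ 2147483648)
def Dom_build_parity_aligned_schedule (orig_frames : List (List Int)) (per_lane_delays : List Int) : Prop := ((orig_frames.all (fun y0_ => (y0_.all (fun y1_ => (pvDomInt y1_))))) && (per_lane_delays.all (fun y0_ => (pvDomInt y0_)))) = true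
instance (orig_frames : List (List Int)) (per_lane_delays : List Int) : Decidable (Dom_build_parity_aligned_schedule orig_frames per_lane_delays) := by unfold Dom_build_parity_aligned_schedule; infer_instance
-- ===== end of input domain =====

-- B replaces A's zero-fill-and-scatter by a per-cell gather (each output cell computes its
-- unique source frame directly); same return value, no in-place mutation — objective: alternative.

-- ===== PORT A =====
def build_parity_aligned_schedule (orig_frames : List (List Int)) (per_lane_delays : List Int) : List (List Int) × List Int :=
  if orig_frames = [] then ([], [])
  else
    let lanes := (orig_frames.headD []).length
    let nonneg := per_lane_delays.filter (fun d => decide (0 ≤ d))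
    let max_delay : Int := if nonneg = [] then 0 else (PySem.List.max? nonneg (fun x => x)).getD 0
    let n := orig_frames.length
    let steps : Int := 2 * (n : Int) + max_delay
    let schedule0 : List (List Int) := (PySem.List.pyRange 0 steps 1).map (fun _ => List.replicate lanes (0 : Int))
    let res := (List.range n).foldl (fun (st : List (List Int) × List Int) (k : Nat) =>
        let A_k : Int := 2 * (k : Int) + max_delay
        let sch := (List.range lanes).foldl (fun (sch : List (List Int)) (r : Nat) =>
            let d : Int := if r < per_lane_delays.length then PySem.List.pyGetD per_lane_delays (r : Int) 0 else max_delay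
            let t : Int := A_k - d
            if 0 ≤ t ∧ t < steps then
              PySem.List.pySetD sch t (PySem.List.pySetD (PySem.List.pyGetD sch t []) (r : Int)
                (PySem.List.pyGetD (PySem.List.pyGetD orig_frames (k : Int) []) (r : Int) 0))
            else sch) st.1
        (sch, st.2 ++ [A_k])) (schedule0, ([] : List Int))
    (res.1 ++ [List.replicate lanes (0 : Int)], res.2)

-- ===== PORT B =====
-- B-side helper: value of output cell (t, r) of the n-frame schedule (Source B's `cell`)
def pvCell (orig_frames : List (List Int)) (per_lane_delays : List Int) (max_delay : Int) (n : Nat) (t : Int) (r : Nat) : Int :=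
  let d : Int := if r < per_lane_delays.length then PySem.List.pyGetD per_lane_delays (r : Int) 0 else max_delay
  let num : Int := t - max_delay + d
  if PySem.Int.mod num 2 ≠ 0 then 0
  else
    let k : Int := PySem.Int.floordiv num 2
    if 0 ≤ k ∧ k < (n : Int) then PySem.List.pyGetD (PySem.List.pyGetD orig_frames k []) (r : Int) 0 else 0

def build_parity_aligned_schedule_alt (orig_frames : List (List Int)) (per_lane_delays : List Int) : List (List Int) × List Int :=
  if orig_frames = [] then ([], [])
  else
    let lanes := (orig_frames.headD []).length
    let nonneg := per_lane_delays.filter (fun d => decide (0 ≤ d))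
    let max_delay : Int := if nonneg = [] then 0 else (PySem.List.max? nonneg (fun x => x)).getD 0
    let n := orig_frames.length
    let steps : Int := 2 * (n : Int) + max_delay
    let ds := (List.range lanes).map (fun (r : Nat) =>
        if r < per_lane_delays.length then PySem.List.pyGetD per_lane_delays (r : Int) 0 else max_delay)
    let lo : Int := if ds = [] then 0 else max_delay - (PySem.List.max? ds (fun x => x)).getD 0
    let hi : Int := if ds = [] then -1 else 2 * ((n : Int) - 1) + max_delay - (PySem.List.min? ds (fun x => x)).getD 0
    let schedule := (PySem.List.pyRange 0 steps 1).map
        (fun t => if lo ≤ t ∧ t ≤ hi then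
            (List.range lanes).map (fun r => pvCell orig_frames per_lane_delays max_delay n t r)
          else List.replicate lanes (0 : Int))
      ++ [List.replicate lanes (0 : Int)]
    let arrivals := (List.range n).map (fun (k : Nat) => 2 * (k : Int) + max_delay)
    (schedule, arrivals)

-- ===== PRECONDITION & SPEC =====
-- Pre_ excludes ragged frame lists (a row shorter than the first row), on which Python A
-- typically raises IndexError reading orig_frames[k][r]; in the rare ragged cases where a
-- large negative delay keeps every such read out of range, A returns and B agrees anyway.
def Pre_build_parity_aligned_schedule (orig_frames : List (List Int)) (per_lane_delays : List Int) : Prop :=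
  ∀ row ∈ orig_frames, (orig_frames.headD []).length ≤ row.length
instance (orig_frames : List (List Int)) (per_lane_delays : List Int) : Decidable (Pre_build_parity_aligned_schedule orig_frames per_lane_delays) := by unfold Pre_build_parity_aligned_schedule; infer_instance
def pvWitness_build_parity_aligned_schedule : List (List Int) × List Int := ([[1, 2], [3, 4]], [1, 2])

def Spec_build_parity_aligned_schedule (orig_frames : List (List Int)) (per_lane_delays : List Int) (out : List (List Int) × List Int) : Prop := out = build_parity_aligned_schedule_alt orig_frames per_lane_delays
instance (orig_frames : List (List Int)) (per_lane_delays : List Int) (out : List (List Int) × List Int) : Decidable (Spec_build_parity_aligned_schedule orig_frames per_lane_delays out) := by unfold Spec_build_parity_aligned_schedule; infer_instance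

-- ===== CLAIM (what is proved, stated in full; the proofs are below) =====
def Claim_equal_build_parity_aligned_schedule : Prop := ∀ (orig_frames : List (List Int)) (per_lane_delays : List Int), Dom_build_parity_aligned_schedule orig_frames per_lane_delays → Pre_build_parity_aligned_schedule orig_frames per_lane_delays → Spec_build_parity_aligned_schedule orig_frames per_lane_delays (build_parity_aligned_schedule orig_frames per_lane_delays)

-- ===== LEMMAS AND PROOFS =====

-- the grid shape both sides produce (rows indexed by pyRange 0 steps 1)
def pvGrid (steps : Int) (lanes : Nat) (f : Int → Nat → Int) : List (List Int) :=
  (PySem.List.pyRange 0 steps 1).map (fun t => (List.range lanes).map (f t))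

-- A's nested in-place write schedule[t][r] = v, as one Nat-indexed update
def pvUpd (G : List (List Int)) (t r : Nat) (v : Int) : List (List Int) :=
  G.set t ((G.getD t []).set r v)

lemma pvUpd_eq_pySet (G : List (List Int)) (t : Int) (r : Nat) (v : Int) (ht : 0 ≤ t) :
    PySem.List.pySetD G t (PySem.List.pySetD (PySem.List.pyGetD G t []) (r : Int) v)
      = pvUpd G t.toNat r v := by
  obtain ⟨m, rfl⟩ : ∃ m : Nat, t = (m : Int) := ⟨t.toNat, (Int.toNat_of_nonneg ht).symm⟩
  simp [pvUpd, PySem.List.pySetD_natCast, PySem.List.pyGetD_natCast]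

lemma pvGrid_congr (steps : Int) (lanes : Nat) (f g : Int → Nat → Int)
    (h : ∀ t r, 0 ≤ t → t < steps → r < lanes → f t r = g t r) :
    pvGrid steps lanes f = pvGrid steps lanes g := by
  unfold pvGrid
  refine List.map_congr_left (fun t ht => ?_)
  rw [PySem.List.mem_pyRange_one] at ht
  exact List.map_congr_left (fun r hr => h t r ht.1 ht.2 (List.mem_range.mp hr))

lemma pvUpd_grid (steps : Int) (lanes : Nat) (f : Int → Nat → Int) (a : Nat) (b : Nat) (v : Int)
    (ha : (a : Int) < steps) :
    pvUpd (pvGrid steps lanes f) a b v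
      = pvGrid steps lanes (fun t r => if t = (a : Int) ∧ r = b then v else f t r) := by
  unfold pvUpd pvGrid
  have hlen : (PySem.List.pyRange 0 steps 1).length = steps.toNat := by
    simp [PySem.List.length_pyRange_one]
  have ha' : a < ((PySem.List.pyRange 0 steps 1).map (fun t => (List.range lanes).map (f t))).length := by
    simp [hlen]; omega
  apply List.ext_getElem
  · simp
  · intro i h1 h2
    simp only [List.getElem_set, List.getElem_map]
    have hi : i < steps.toNat := by simpa [hlen] using (by simpa using h2 : i < (PySem.List.pyRange 0 steps 1).length)
    have hti : (PySem.List.pyRange 0 steps 1)[i] = (i : Int) := by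
      rw [PySem.List.getElem_pyRange_one]; ring
    by_cases hia : a = i
    · subst hia
      have hrow : (((PySem.List.pyRange 0 steps 1).map (fun t => (List.range lanes).map (f t))).getD a [])
          = (List.range lanes).map (f (a : Int)) := by
        rw [List.getD_eq_getElem _ _ ha']
        simp [hti]
      rw [if_pos rfl, hrow, hti]
      apply List.ext_getElem
      · simp
      · intro j hj1 hj2
        simp only [List.getElem_set, List.getElem_map, List.getElem_range]
        rcases eq_or_ne b j with hjb | hjb
        · simp [hjb]
        · simp [hjb, Ne.symm hjb]
    · rw [if_neg hia]
      have hne : (PySem.List.pyRange 0 steps 1)[i] ≠ (a : Int) := by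
        rw [hti]; exact_mod_cast fun hh => hia (by exact_mod_cast hh.symm)
      apply List.map_congr_left
      intro r hr
      rw [if_neg (fun hh => hne hh.1)]

lemma pvInner_fold (steps : Int) (lanes : Nat) (tOf vOf : Nat → Int) (f : Int → Nat → Int) (j : Nat) :
    (List.range j).foldl (fun sch r =>
        if 0 ≤ tOf r ∧ tOf r < steps then pvUpd sch (tOf r).toNat r (vOf r) else sch)
      (pvGrid steps lanes f)
      = pvGrid steps lanes (fun t r => if r < j ∧ t = tOf r then vOf r else f t r) := by
  induction j with
  | zero =>
    simp only [List.range_zero, List.foldl_nil]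
    exact pvGrid_congr _ _ _ _ (fun t r _ _ _ => by simp)
  | succ j ih =>
    rw [List.range_succ, List.foldl_append, ih, List.foldl_cons, List.foldl_nil]
    by_cases hc : 0 ≤ tOf j ∧ tOf j < steps
    · rw [if_pos hc]
      have hcast : ((tOf j).toNat : Int) = tOf j := Int.toNat_of_nonneg hc.1
      rw [pvUpd_grid _ _ _ _ _ _ (by omega)]
      apply pvGrid_congr
      intro t r ht0 hts hr
      by_cases hrj : r = j
      · subst hrj
        by_cases htj : t = tOf r
        · rw [if_pos ⟨htj.trans hcast.symm, rfl⟩, if_pos ⟨Nat.lt_succ_self r, htj⟩]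
        · rw [if_neg (fun h => htj (h.1.trans hcast)),
              if_neg (fun h => absurd h.1 (lt_irrefl r)),
              if_neg (fun h => htj h.2)]
      · rw [if_neg (fun h => hrj h.2)]
        by_cases hlt : r < j ∧ t = tOf r
        · rw [if_pos hlt, if_pos ⟨Nat.lt_succ_of_lt hlt.1, hlt.2⟩]
        · rw [if_neg hlt]
          rw [if_neg (fun h => hlt ⟨by omega, h.2⟩)]
    · rw [if_neg hc]
      apply pvGrid_congr
      intro t r ht0 hts hr
      by_cases hrj : r = j
      · subst hrj
        rw [if_neg (by intro h; omega), if_neg (by intro h; rw [h.2] at ht0 hts; omega)]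
      · by_cases hlt : r < j ∧ t = tOf r
        · rw [if_pos hlt, if_pos ⟨Nat.lt_succ_of_lt hlt.1, hlt.2⟩]
        · rw [if_neg hlt, if_neg (fun h => hlt ⟨by omega, h.2⟩)]

-- one frame step turns the m-frame gather into the (m+1)-frame gather
lemma pvCell_step (orig_frames : List (List Int)) (per_lane_delays : List Int) (c : Int)
    (m : Nat) (t : Int) (r : Nat)
    (dv : Int) (hd : dv = if r < per_lane_delays.length then PySem.List.pyGetD per_lane_delays (r : Int) 0 else c) :
    (if t = 2 * (m : Int) + c - dv then PySem.List.pyGetD (PySem.List.pyGetD orig_frames (m : Int) []) (r : Int) 0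
     else pvCell orig_frames per_lane_delays c m t r)
      = pvCell orig_frames per_lane_delays c (m + 1) t r := by
  unfold pvCell
  rw [← hd]
  simp only [PySem.Int.mod_eq_emod_of_pos (by norm_num : (0:Int) < 2),
      PySem.Int.floordiv_eq_ediv_of_pos (by norm_num : (0:Int) < 2)]
  split_ifs <;> first | rfl | omega | (congr 3 <;> omega)

-- A's whole frame loop produces exactly the n-frame gather grid and the arrivals list
lemma pvOuter (orig_frames : List (List Int)) (per_lane_delays : List Int) (c steps : Int) (lanes : Nat)
    (m : Nat) :
    (List.range m).foldl (fun (st : List (List Int) × List Int) (k : Nat) =>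
        ((List.range lanes).foldl (fun (sch : List (List Int)) (r : Nat) =>
            if 0 ≤ 2 * (k : Int) + c - (if r < per_lane_delays.length then PySem.List.pyGetD per_lane_delays (r : Int) 0 else c) ∧
               2 * (k : Int) + c - (if r < per_lane_delays.length then PySem.List.pyGetD per_lane_delays (r : Int) 0 else c) < steps then
              PySem.List.pySetD sch (2 * (k : Int) + c - (if r < per_lane_delays.length then PySem.List.pyGetD per_lane_delays (r : Int) 0 else c))
                (PySem.List.pySetD (PySem.List.pyGetD sch (2 * (k : Int) + c - (if r < per_lane_delays.length then PySem.List.pyGetD per_lane_delays (r : Int) 0 else c)) []) (r : Int)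
                  (PySem.List.pyGetD (PySem.List.pyGetD orig_frames (k : Int) []) (r : Int) 0))
            else sch) st.1,
         st.2 ++ [2 * (k : Int) + c])) (pvGrid steps lanes (fun _ _ => 0), ([] : List Int))
      = (pvGrid steps lanes (pvCell orig_frames per_lane_delays c m),
         (List.range m).map (fun (k : Nat) => 2 * (k : Int) + c)) := by
  induction m with
  | zero =>
    simp only [List.range_zero, List.foldl_nil, List.map_nil]
    refine Prod.ext ?_ rfl
    refine pvGrid_congr _ _ _ _ (fun t r _ _ _ => ?_)
    simp only [pvCell]
    split_ifs with h1 h2 <;> first | rfl | omega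
  | succ m ih =>
    rw [List.range_succ, List.foldl_append, ih, List.foldl_cons, List.foldl_nil]
    refine Prod.ext ?_ (by simp)
    show (List.range lanes).foldl _ (pvGrid steps lanes (pvCell orig_frames per_lane_delays c m)) = _
    have hstep : (fun (sch : List (List Int)) (r : Nat) =>
            if 0 ≤ 2 * (m : Int) + c - (if r < per_lane_delays.length then PySem.List.pyGetD per_lane_delays (r : Int) 0 else c) ∧
               2 * (m : Int) + c - (if r < per_lane_delays.length then PySem.List.pyGetD per_lane_delays (r : Int) 0 else c) < steps then
              PySem.List.pySetD sch (2 * (m : Int) + c - (if r < per_lane_delays.length then PySem.List.pyGetD per_lane_delays (r : Int) 0 else c))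
                (PySem.List.pySetD (PySem.List.pyGetD sch (2 * (m : Int) + c - (if r < per_lane_delays.length then PySem.List.pyGetD per_lane_delays (r : Int) 0 else c)) []) (r : Int)
                  (PySem.List.pyGetD (PySem.List.pyGetD orig_frames (m : Int) []) (r : Int) 0))
            else sch)
        = (fun sch r =>
            if 0 ≤ 2 * (m : Int) + c - (if r < per_lane_delays.length then PySem.List.pyGetD per_lane_delays (r : Int) 0 else c) ∧
               2 * (m : Int) + c - (if r < per_lane_delays.length then PySem.List.pyGetD per_lane_delays (r : Int) 0 else c) < steps then
              pvUpd sch (2 * (m : Int) + c - (if r < per_lane_delays.length then PySem.List.pyGetD per_lane_delays (r : Int) 0 else c)).toNat r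
                (PySem.List.pyGetD (PySem.List.pyGetD orig_frames (m : Int) []) (r : Int) 0)
            else sch) := by
      funext sch r
      by_cases h : 0 ≤ 2 * (m : Int) + c - (if r < per_lane_delays.length then PySem.List.pyGetD per_lane_delays (r : Int) 0 else c) ∧
          2 * (m : Int) + c - (if r < per_lane_delays.length then PySem.List.pyGetD per_lane_delays (r : Int) 0 else c) < steps
      · rw [if_pos h, if_pos h, pvUpd_eq_pySet _ _ _ _ h.1]
      · rw [if_neg h, if_neg h]
    rw [hstep, pvInner_fold]
    refine pvGrid_congr _ _ _ _ (fun t r ht0 hts hr => ?_)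
    rw [← pvCell_step orig_frames per_lane_delays c m t r _ rfl]
    simp [hr]

lemma pvSched0 (steps : Int) (lanes : Nat) :
    (PySem.List.pyRange 0 steps 1).map (fun _ => List.replicate lanes (0 : Int))
      = pvGrid steps lanes (fun _ _ => 0) := by
  unfold pvGrid
  refine List.map_congr_left (fun t _ => ?_)
  simp [List.map_const']

-- rows outside the arrival band [lo, hi] of the gather are all-zero
lemma pvCell_zero (orig_frames : List (List Int)) (per_lane_delays : List Int) (c : Int)
    (n : Nat) (t : Int) (r : Nat) (M Mn : Int)
    (hM : (if r < per_lane_delays.length then PySem.List.pyGetD per_lane_delays (r : Int) 0 else c) ≤ M)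
    (hMn : Mn ≤ (if r < per_lane_delays.length then PySem.List.pyGetD per_lane_delays (r : Int) 0 else c))
    (hband : ¬(c - M ≤ t ∧ t ≤ 2 * ((n : Int) - 1) + c - Mn)) :
    pvCell orig_frames per_lane_delays c n t r = 0 := by
  unfold pvCell
  simp only [PySem.Int.mod_eq_emod_of_pos (by norm_num : (0:Int) < 2),
      PySem.Int.floordiv_eq_ediv_of_pos (by norm_num : (0:Int) < 2)]
  split_ifs <;> first | rfl | omega

lemma pvBand (orig_frames : List (List Int)) (per_lane_delays : List Int) (c steps : Int) (lanes n : Nat) :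
    pvGrid steps lanes (pvCell orig_frames per_lane_delays c n)
      = (PySem.List.pyRange 0 steps 1).map (fun t =>
          if (if (List.range lanes).map (fun (r : Nat) => if r < per_lane_delays.length then PySem.List.pyGetD per_lane_delays (r : Int) 0 else c) = []
                then 0
                else c - (PySem.List.max? ((List.range lanes).map (fun (r : Nat) => if r < per_lane_delays.length then PySem.List.pyGetD per_lane_delays (r : Int) 0 else c)) (fun x => x)).getD 0) ≤ t ∧
             t ≤ (if (List.range lanes).map (fun (r : Nat) => if r < per_lane_delays.length then PySem.List.pyGetD per_lane_delays (r : Int) 0 else c) = []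
                then -1
                else 2 * ((n : Int) - 1) + c - (PySem.List.min? ((List.range lanes).map (fun (r : Nat) => if r < per_lane_delays.length then PySem.List.pyGetD per_lane_delays (r : Int) 0 else c)) (fun x => x)).getD 0) then
            (List.range lanes).map (fun r => pvCell orig_frames per_lane_delays c n t r)
          else List.replicate lanes 0) := by
  unfold pvGrid
  refine List.map_congr_left (fun t ht => ?_)
  by_cases hband :
      (if (List.range lanes).map (fun (r : Nat) => if r < per_lane_delays.length then PySem.List.pyGetD per_lane_delays (r : Int) 0 else c) = []
        then (0 : Int)
        else c - (PySem.List.max? ((List.range lanes).map (fun (r : Nat) => if r < per_lane_delays.length then PySem.List.pyGetD per_lane_delays (r : Int) 0 else c)) (fun x => x)).getD 0) ≤ t ∧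
      t ≤ (if (List.range lanes).map (fun (r : Nat) => if r < per_lane_delays.length then PySem.List.pyGetD per_lane_delays (r : Int) 0 else c) = []
        then (-1 : Int)
        else 2 * ((n : Int) - 1) + c - (PySem.List.min? ((List.range lanes).map (fun (r : Nat) => if r < per_lane_delays.length then PySem.List.pyGetD per_lane_delays (r : Int) 0 else c)) (fun x => x)).getD 0)
  · rw [if_pos hband]
  · rw [if_neg hband]
    rcases Nat.eq_zero_or_pos lanes with h0 | hpos
    · subst h0; rfl
    · have hds : (List.range lanes).map (fun (r : Nat) => if r < per_lane_delays.length then PySem.List.pyGetD per_lane_delays (r : Int) 0 else c) ≠ [] := by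
        simp [List.map_eq_nil_iff, List.range_eq_nil]; omega
      obtain ⟨M, hM⟩ : ∃ M, PySem.List.max? ((List.range lanes).map (fun (r : Nat) => if r < per_lane_delays.length then PySem.List.pyGetD per_lane_delays (r : Int) 0 else c)) (fun x => x) = some M := by
        cases hc : PySem.List.max? ((List.range lanes).map (fun (r : Nat) => if r < per_lane_delays.length then PySem.List.pyGetD per_lane_delays (r : Int) 0 else c)) (fun x => x) with
        | none => exact absurd ((PySem.List.max?_eq_none_iff _ _).mp hc) hds
        | some M => exact ⟨M, rfl⟩
      obtain ⟨Mn, hMn⟩ : ∃ Mn, PySem.List.min? ((List.range lanes).map (fun (r : Nat) => if r < per_lane_delays.length then PySem.List.pyGetD per_lane_delays (r : Int) 0 else c)) (fun x => x) = some Mn := by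
        cases hc : PySem.List.min? ((List.range lanes).map (fun (r : Nat) => if r < per_lane_delays.length then PySem.List.pyGetD per_lane_delays (r : Int) 0 else c)) (fun x => x) with
        | none => exact absurd ((PySem.List.min?_eq_none_iff _ _).mp hc) hds
        | some Mn => exact ⟨Mn, rfl⟩
      rw [if_neg hds, if_neg hds, hM, hMn] at hband
      simp only [Option.getD_some] at hband
      refine List.eq_replicate_iff.mpr ⟨by simp, fun x hx => ?_⟩
      obtain ⟨r, hr, rfl⟩ := List.mem_map.mp hx
      have hmem : (if r < per_lane_delays.length then PySem.List.pyGetD per_lane_delays (r : Int) 0 else c)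
          ∈ (List.range lanes).map (fun (r : Nat) => if r < per_lane_delays.length then PySem.List.pyGetD per_lane_delays (r : Int) 0 else c) :=
        List.mem_map.mpr ⟨r, hr, rfl⟩
      exact pvCell_zero orig_frames per_lane_delays c n t r M Mn
        (PySem.List.max?_isMax hM _ hmem) (PySem.List.min?_isMin hMn _ hmem) hband

lemma pvMain (orig_frames : List (List Int)) (per_lane_delays : List Int) :
    build_parity_aligned_schedule orig_frames per_lane_delays
      = build_parity_aligned_schedule_alt orig_frames per_lane_delays := by
  by_cases h : orig_frames = []
  · simp [build_parity_aligned_schedule, build_parity_aligned_schedule_alt, h]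
  · simp only [build_parity_aligned_schedule, build_parity_aligned_schedule_alt, if_neg h]
    rw [pvSched0, pvOuter, pvBand]

-- ===== VERDICT (by name: the statement is the Claim_ definition above) =====
theorem build_parity_aligned_schedule_spec : Claim_equal_build_parity_aligned_schedule := by
  intro orig_frames per_lane_delays _ _
  unfold Spec_build_parity_aligned_schedule
  exact pvMain orig_frames per_lane_delays
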